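-- pv_equiv track=rewrite | github.com/pablolluchr/emotion-detection-app | training/dataset_preprocessing.py | reduceClipDataDISFA
-- ===== SOURCE A (Python) =====
-- def reduceClipDataDISFA(clip_data):
--     keys = list(clip_data.keys())
--     keys.sort()
--     last_aus = None
--     reduced_clip_data = {}
--     for k in keys:
--         if clip_data[k]==last_aus: #take 1 out of every 20th frame
--             if k%20==0:
--                 reduced_clip_data[k]=clip_data[k]
--         else:
--             reduced_clip_data[k]=clip_data[k]
--         last_aus = clip_data[k]
--
--     return reduced_clip_data
-- ===== SOURCE B (Python) =====
-- def reduceClipDataDISFA(clip_data):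
--     # Run-based rewrite: sort the keys once, then process maximal runs of
--     # consecutive frames with equal AU values: the first frame of a run is
--     # always kept (its value changed), later frames only when k % 20 == 0.
--     ks = sorted(clip_data)
--     out = {}
--     i, n = 0, len(ks)
--     while i < n:
--         v = clip_data[ks[i]]
--         out[ks[i]] = v
--         j = i + 1
--         while j < n and clip_data[ks[j]] == v:
--             if ks[j] % 20 == 0:
--                 out[ks[j]] = v
--             j += 1
--         i = j
--     return out
-- ===== Notes on version B (the rewrite author's own statement) =====
-- stated objective: alternative
-- what changed: Replaces the single pass carrying a last_aus sentinel (initialised to None) with a run-based traversal of the sorted keys: an outer loop takes the first key of each maximal run of equal AU values unconditionally and an inner loop keeps only every 20th frame within the run, so no None sentinel or per-step comparison state exists.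
import Mathlib
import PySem

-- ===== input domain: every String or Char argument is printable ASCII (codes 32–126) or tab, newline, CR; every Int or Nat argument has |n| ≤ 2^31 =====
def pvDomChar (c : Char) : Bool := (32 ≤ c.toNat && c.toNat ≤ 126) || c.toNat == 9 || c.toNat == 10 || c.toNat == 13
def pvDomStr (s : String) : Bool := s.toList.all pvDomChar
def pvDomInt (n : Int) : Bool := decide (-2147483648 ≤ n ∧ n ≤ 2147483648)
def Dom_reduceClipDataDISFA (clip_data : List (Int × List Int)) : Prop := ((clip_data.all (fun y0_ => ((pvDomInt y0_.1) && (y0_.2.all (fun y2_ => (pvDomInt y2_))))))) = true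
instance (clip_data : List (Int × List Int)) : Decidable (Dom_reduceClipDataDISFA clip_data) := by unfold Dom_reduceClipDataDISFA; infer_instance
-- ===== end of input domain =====

-- B rewrites A's single pass with a `last_aus` sentinel as a run-based traversal of the
-- sorted keys (same results; an alternative decomposition, no speed claim).

-- ===== PORT A =====
-- the for-loop over the sorted keys, carrying last_aus and the result dict
def reduceClipDataDISFA_go (d : PySem.Dict Int (List Int)) :
    List Int → Option (List Int) → PySem.Dict Int (List Int) → PySem.Dict Int (List Int)
  | [], _, out => out
  | k :: rest, last, out =>
    let v := d.get? k          -- clip_data[k] (k is a key, so always some)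
    let out' := if v = last then
        (if PySem.Int.mod k 20 = 0 then out.insert k (v.getD []) else out)
      else out.insert k (v.getD [])
    reduceClipDataDISFA_go d rest v out'

def reduceClipDataDISFA (clip_data : List (Int × List Int)) : List (Int × List Int) :=
  let d := PySem.Dict.ofList clip_data
  let keys := PySem.List.sorted d.keys (fun k => k) false
  (reduceClipDataDISFA_go d keys none PySem.Dict.empty).items

-- ===== PORT B =====
-- inner while loop: consume keys while their value equals v, keeping every 20th frame
def reduceClipDataDISFA_run (d : PySem.Dict Int (List Int)) (v : Option (List Int)) :
    List Int → PySem.Dict Int (List Int) → PySem.Dict Int (List Int) × List Int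
  | [], out => (out, [])
  | k :: rest, out =>
    if d.get? k = v then
      reduceClipDataDISFA_run d v rest
        (if PySem.Int.mod k 20 = 0 then out.insert k ((d.get? k).getD []) else out)
    else (out, k :: rest)

lemma reduceClipDataDISFA_run_len (d : PySem.Dict Int (List Int)) (v : Option (List Int)) :
    ∀ (ks : List Int) (out : PySem.Dict Int (List Int)),
      (reduceClipDataDISFA_run d v ks out).2.length ≤ ks.length := by
  intro ks
  induction ks with
  | nil => intro out; simp [reduceClipDataDISFA_run]
  | cons k rest ih =>
    intro out
    simp only [reduceClipDataDISFA_run]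
    split
    · exact Nat.le_succ_of_le (ih _)
    · simp

-- outer while loop: one iteration per run of equal values
def reduceClipDataDISFA_outer (d : PySem.Dict Int (List Int)) :
    List Int → PySem.Dict Int (List Int) → PySem.Dict Int (List Int)
  | [], out => out
  | k :: rest, out =>
    let v := d.get? k
    let p := reduceClipDataDISFA_run d v rest (out.insert k (v.getD []))
    reduceClipDataDISFA_outer d p.2 p.1
termination_by ks => ks.length
decreasing_by
  exact Nat.lt_succ_of_le (reduceClipDataDISFA_run_len d _ rest _)

def reduceClipDataDISFA_alt (clip_data : List (Int × List Int)) : List (Int × List Int) :=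
  let d := PySem.Dict.ofList clip_data
  let keys := PySem.List.sorted d.keys (fun k => k) false
  (reduceClipDataDISFA_outer d keys PySem.Dict.empty).items

-- ===== PRECONDITION & SPEC =====
def Spec_reduceClipDataDISFA (clip_data : List (Int × List Int)) (out : List (Int × List Int)) : Prop := out = reduceClipDataDISFA_alt clip_data
instance (clip_data : List (Int × List Int)) (out : List (Int × List Int)) : Decidable (Spec_reduceClipDataDISFA clip_data out) := by unfold Spec_reduceClipDataDISFA; infer_instance

-- ===== CLAIM (what is proved, stated in full; the proofs are below) =====
def Claim_equal_reduceClipDataDISFA : Prop := ∀ (clip_data : List (Int × List Int)), Dom_reduceClipDataDISFA clip_data → Spec_reduceClipDataDISFA clip_data (reduceClipDataDISFA clip_data)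

-- ===== LEMMAS AND PROOFS =====

-- while A's current value equals last, A's loop does exactly what B's inner run loop does
lemma go_run (d : PySem.Dict Int (List Int)) (v : Option (List Int)) :
    ∀ (ks : List Int) (out : PySem.Dict Int (List Int)),
      reduceClipDataDISFA_go d ks v out =
        reduceClipDataDISFA_go d (reduceClipDataDISFA_run d v ks out).2 v
          (reduceClipDataDISFA_run d v ks out).1 := by
  intro ks
  induction ks with
  | nil => intro out; simp [reduceClipDataDISFA_run]
  | cons k rest ih =>
    intro out
    by_cases h : d.get? k = v
    · simp only [reduceClipDataDISFA_run, reduceClipDataDISFA_go, h, if_pos]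
      exact ih _
    · simp [reduceClipDataDISFA_run, h]

-- the remainder of a run starts with a key whose value differs from v (or is empty)
lemma run_rem_head (d : PySem.Dict Int (List Int)) (v : Option (List Int)) :
    ∀ (ks : List Int) (out : PySem.Dict Int (List Int)) (k' : Int) (t : List Int),
      (reduceClipDataDISFA_run d v ks out).2 = k' :: t → d.get? k' ≠ v := by
  intro ks
  induction ks with
  | nil => intro out k' t h; simp [reduceClipDataDISFA_run] at h
  | cons k rest ih =>
    intro out k' t h
    by_cases hv : d.get? k = v
    · simp only [reduceClipDataDISFA_run, hv, if_pos] at h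
      exact ih _ _ _ h
    · simp only [reduceClipDataDISFA_run, hv, if_neg, not_false_iff] at h
      injection h with h1 _
      rw [← h1]; exact hv

-- main induction (on a fuel bound for the list length): whenever the head's value
-- differs from last, A's remaining loop equals B's outer loop
lemma go_eq_outer (d : PySem.Dict Int (List Int)) :
    ∀ (n : Nat) (ks : List Int) (last : Option (List Int)) (out : PySem.Dict Int (List Int)),
      ks.length ≤ n →
      (∀ k' t, ks = k' :: t → d.get? k' ≠ last) →
      reduceClipDataDISFA_go d ks last out = reduceClipDataDISFA_outer d ks out := by
  intro n
  induction n with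
  | zero =>
    intro ks last out hn _
    have : ks = [] := List.eq_nil_of_length_eq_zero (Nat.le_zero.mp hn)
    subst this
    simp [reduceClipDataDISFA_go, reduceClipDataDISFA_outer]
  | succ n ih =>
    intro ks last out hn hhead
    cases ks with
    | nil => simp [reduceClipDataDISFA_go, reduceClipDataDISFA_outer]
    | cons k rest =>
      have hne : d.get? k ≠ last := hhead k rest rfl
      simp only [reduceClipDataDISFA_go, reduceClipDataDISFA_outer, if_neg hne]
      rw [go_run d (d.get? k) rest (out.insert k ((d.get? k).getD []))]
      exact ih _ _ _
        (le_trans (reduceClipDataDISFA_run_len d _ rest _) (Nat.le_of_succ_le_succ hn))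
        (fun k' t h => run_rem_head d _ rest _ k' t h)

-- values looked up along the key list are always `some`, so the initial `none`
-- sentinel never matches the head
lemma get?_ne_none_of_mem_keys (d : PySem.Dict Int (List Int)) (k : Int)
    (h : k ∈ d.keys) : d.get? k ≠ none := by
  intro hnone
  exact absurd h ((PySem.Dict.get?_eq_none_iff_not_mem_keys d k).mp hnone)

-- ===== VERDICT (by name: the statement is the Claim_ definition above) =====
theorem reduceClipDataDISFA_spec : Claim_equal_reduceClipDataDISFA := by
  intro clip_data _
  unfold Spec_reduceClipDataDISFA reduceClipDataDISFA reduceClipDataDISFA_alt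
  show (reduceClipDataDISFA_go (PySem.Dict.ofList clip_data)
      (PySem.List.sorted (PySem.Dict.ofList clip_data).keys (fun k => k) false) none
      PySem.Dict.empty).items =
    (reduceClipDataDISFA_outer (PySem.Dict.ofList clip_data)
      (PySem.List.sorted (PySem.Dict.ofList clip_data).keys (fun k => k) false)
      PySem.Dict.empty).items
  apply congrArg
  apply go_eq_outer _ (PySem.List.sorted (PySem.Dict.ofList clip_data).keys (fun k => k) false).length
  · exact le_rfl
  · intro k' t h
    apply get?_ne_none_of_mem_keys
    have : k' ∈ PySem.List.sorted (PySem.Dict.ofList clip_data).keys (fun k => k) false := by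
      rw [h]; exact List.mem_cons_self ..
    exact (PySem.List.mem_sorted _ _ _ _).mp this
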